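-- pv_equiv track=rewrite | github.com/ivi982010/SySdL-TPs | Lexer.py | a_Minus
-- ===== SOURCE A (Python) =====
-- def a_Minus (tokens, acu):
--     s = 0
--     for c in acu:
--         if c == '-':
--             s = 1
--         else:
--             s = -1
--     if s == 1:
--         tokens.append(("<OpMat>", acu))
--     return (s == 1)
-- ===== SOURCE B (Python) =====
-- def a_Minus(tokens, acu):
--     matched = bool(acu) and acu[-1] == '-'
--     if matched:
--         tokens.append(("<OpMat>", acu))
--     return matched
-- ===== Notes on version B (the rewrite author's own statement) =====
-- stated objective: simpler
-- what changed: The loop overwrites the flag on every character, so only the last character matters; B replaces the scan with a closed-form check of acu[-1].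
import Mathlib
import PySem

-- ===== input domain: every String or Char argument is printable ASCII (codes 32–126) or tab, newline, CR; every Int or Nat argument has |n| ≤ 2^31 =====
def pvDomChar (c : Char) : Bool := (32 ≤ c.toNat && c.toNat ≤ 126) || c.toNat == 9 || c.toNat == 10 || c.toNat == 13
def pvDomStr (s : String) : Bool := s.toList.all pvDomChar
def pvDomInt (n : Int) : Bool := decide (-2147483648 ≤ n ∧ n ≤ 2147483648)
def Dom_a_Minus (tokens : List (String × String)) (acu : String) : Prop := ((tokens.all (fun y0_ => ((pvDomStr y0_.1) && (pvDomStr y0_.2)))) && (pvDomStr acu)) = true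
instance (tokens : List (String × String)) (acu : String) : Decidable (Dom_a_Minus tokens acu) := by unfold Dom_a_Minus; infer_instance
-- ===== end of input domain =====

-- B replaces A's character scan with a closed-form check of acu's last character (O(1)).
-- Both A and B append ("<OpMat>", acu) to tokens when returning True; the theorem is about the return value only.
-- ===== PORT A =====
def a_Minus (tokens : List (String × String)) (acu : String) : Bool :=
  let s : Int := acu.toList.foldl (fun s c => if c = '-' then 1 else -1) 0
  -- if s == 1: tokens.append(...)  (mutation; return value only)
  s == 1

-- ===== PORT B =====
def a_Minus_alt (tokens : List (String × String)) (acu : String) : Bool :=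
  !acu.toList.isEmpty && (acu.toList.getLastD ' ' == '-')

-- ===== PRECONDITION & SPEC =====
def Spec_a_Minus (tokens : List (String × String)) (acu : String) (out : Bool) : Prop := out = a_Minus_alt tokens acu
instance (tokens : List (String × String)) (acu : String) (out : Bool) : Decidable (Spec_a_Minus tokens acu out) := by unfold Spec_a_Minus; infer_instance

-- ===== CLAIM (what is proved, stated in full; the proofs are below) =====
def Claim_equal_a_Minus : Prop := ∀ (tokens : List (String × String)) (acu : String), Dom_a_Minus tokens acu → Spec_a_Minus tokens acu (a_Minus tokens acu)

-- ===== LEMMAS AND PROOFS =====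
theorem aMinus_fold_nonempty (l : List Char) (c : Char) (s : Int) :
    (c :: l).foldl (fun s c => if c = '-' then 1 else -1) s
      = (if (c :: l).getLastD ' ' = '-' then (1 : Int) else -1) := by
  induction l generalizing c s with
  | nil => simp [List.foldl]
  | cons d l ih =>
      have := ih d (if c = '-' then 1 else -1)
      simpa [List.foldl] using this

-- ===== VERDICT (by name: the statement is the Claim_ definition above) =====
theorem a_Minus_spec : Claim_equal_a_Minus := by
  intro tokens acu _
  unfold Spec_a_Minus a_Minus a_Minus_alt
  cases h : acu.toList with
  | nil => simp
  | cons c l =>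
      simp only [h, aMinus_fold_nonempty, List.isEmpty_cons]
      split_ifs with hc <;> simp_all
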